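-- pv_equiv track=rewrite | github.com/doriandub/hospup-backend-oct25 | app/services/quota.py | calculate_subscription_price
-- ===== SOURCE A (Python) =====
-- ADDITIONAL_PROPERTY_PRICING = [
--     {"price_eur": 59},   # First property (base)
--     {"price_eur": 55},   # Second property
--     {"price_eur": 50},   # Third property
--     {"price_eur": 45},   # Fourth+ properties
-- ]
--
-- def calculate_subscription_price(properties_count: int) -> int:
--     """Calculate total subscription price in EUR for given number of properties"""
--     if properties_count <= 0:
--         return 0
--
--     total_price = 0
--     for i in range(properties_count):
--         if i < len(ADDITIONAL_PROPERTY_PRICING):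
--             total_price += ADDITIONAL_PROPERTY_PRICING[i]["price_eur"]
--         else:
--             # Use last tier pricing for additional properties
--             total_price += ADDITIONAL_PROPERTY_PRICING[-1]["price_eur"]
--
--     return total_price
-- ===== SOURCE B (Python) =====
-- ADDITIONAL_PROPERTY_PRICING = [
--     {"price_eur": 59},
--     {"price_eur": 55},
--     {"price_eur": 50},
--     {"price_eur": 45},
-- ]
--
-- # Closed form: cumulative prefix sums of the tiers, plus any extra
-- # properties at the last tier's price.
-- _PREFIX = [0, 59, 114, 164, 209]
--
-- def calculate_subscription_price(properties_count: int) -> int: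
--     if properties_count <= 0:
--         return 0
--     if properties_count <= 4:
--         return _PREFIX[properties_count]
--     return 209 + (properties_count - 4) * 45
-- ===== Notes on version B (the rewrite author's own statement) =====
-- stated objective: faster
-- what changed: Replaced the per-property loop over range(n) with a closed form: a precomputed prefix sum of the fixed tiers plus the remaining count times the last tier's price.
import Mathlib
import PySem

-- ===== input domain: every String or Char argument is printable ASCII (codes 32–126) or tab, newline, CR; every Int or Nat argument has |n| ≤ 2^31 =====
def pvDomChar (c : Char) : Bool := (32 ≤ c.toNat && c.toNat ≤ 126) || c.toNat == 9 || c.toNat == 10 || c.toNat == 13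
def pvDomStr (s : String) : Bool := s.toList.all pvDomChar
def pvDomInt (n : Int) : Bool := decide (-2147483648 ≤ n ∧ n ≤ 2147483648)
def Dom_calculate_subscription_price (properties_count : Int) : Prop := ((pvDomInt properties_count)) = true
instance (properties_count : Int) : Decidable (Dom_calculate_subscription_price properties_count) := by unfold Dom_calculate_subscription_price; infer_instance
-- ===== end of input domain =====

-- B replaces A's per-property loop by a closed form (tier prefix sum + (n-4)*45): faster.

-- ===== PORT A =====
def pvPricing : List (PySem.Dict String Int) :=
  [PySem.Dict.ofList [("price_eur", 59)],
   PySem.Dict.ofList [("price_eur", 55)],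
   PySem.Dict.ofList [("price_eur", 50)],
   PySem.Dict.ofList [("price_eur", 45)]]

-- Loop body of A: indexing is always in range on the reached branch, so .getD is exact.
def pvStepA (acc : Int) (i : Int) : Int :=
  if i < (pvPricing.length : Int) then
    acc + (((PySem.List.pyGet? pvPricing i).getD PySem.Dict.empty).getD "price_eur" 0)
  else
    acc + (((PySem.List.pyGet? pvPricing (-1)).getD PySem.Dict.empty).getD "price_eur" 0)

def calculate_subscription_price (properties_count : Int) : Int :=
  if properties_count ≤ 0 then 0
  else (PySem.List.pyRange 0 properties_count 1).foldl pvStepA 0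

-- ===== PORT B =====
def pvPrefix : List Int := [0, 59, 114, 164, 209]

def calculate_subscription_price_alt (properties_count : Int) : Int :=
  if properties_count ≤ 0 then 0
  else if properties_count ≤ 4 then (PySem.List.pyGet? pvPrefix properties_count).getD 0
  else 209 + (properties_count - 4) * 45

-- ===== PRECONDITION & SPEC =====
def Spec_calculate_subscription_price (properties_count : Int) (out : Int) : Prop := out = calculate_subscription_price_alt properties_count
instance (properties_count : Int) (out : Int) : Decidable (Spec_calculate_subscription_price properties_count out) := by unfold Spec_calculate_subscription_price; infer_instance

-- ===== CLAIM (what is proved, stated in full; the proofs are below) =====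
def Claim_equal_calculate_subscription_price : Prop := ∀ (properties_count : Int), Dom_calculate_subscription_price properties_count → Spec_calculate_subscription_price properties_count (calculate_subscription_price properties_count)

-- ===== LEMMAS AND PROOFS =====

-- A's loop past the fourth property: each further iteration adds the last tier's 45.
theorem pvA_tail (k : Nat) :
    (PySem.List.pyRange 0 ((k : Int) + 4) 1).foldl pvStepA 0 = 209 + (k : Int) * 45 := by
  induction k with
  | zero => decide
  | succ k ih =>
      push_cast
      have h : ((k : Int) + 1 + 4) = ((k : Int) + 4) + 1 := by ring
      rw [h, PySem.List.pyRange_one_succ_right (by omega), List.foldl_append]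
      simp only [List.foldl]
      have hk : ¬ ((k : Int) + 4 < (pvPricing.length : Int)) := by
        simp [pvPricing]
      rw [ih]
      simp only [pvStepA, if_neg hk]
      have h45 : (((PySem.List.pyGet? pvPricing (-1)).getD PySem.Dict.empty).getD "price_eur" 0) = 45 := by decide
      rw [h45]; ring

-- ===== VERDICT (by name: the statement is the Claim_ definition above) =====
theorem calculate_subscription_price_spec : Claim_equal_calculate_subscription_price := by
  intro n _
  unfold Spec_calculate_subscription_price
  by_cases h0 : n ≤ 0
  · simp [calculate_subscription_price, calculate_subscription_price_alt, h0]
  · by_cases h4 : n ≤ 4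
    · have : n = 1 ∨ n = 2 ∨ n = 3 ∨ n = 4 := by omega
      rcases this with h | h | h | h <;> subst h <;> decide
    · obtain ⟨k, hk⟩ : ∃ k : Nat, n = (k : Int) + 4 := ⟨(n - 4).toNat, by omega⟩
      subst hk
      rw [calculate_subscription_price, calculate_subscription_price_alt,
          if_neg h0, if_neg h0, if_neg h4, pvA_tail]
      ring
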